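-- pv_equiv track=rewrite | github.com/Huawei-PaaS/kubernetes | third_party/csms-fuxi/huawei.com~fuxivol/fuxi/controllers/storage_manager/virtual_machine/vm_volume_util.py | search_dir
-- ===== SOURCE A (Python) =====
-- MOUNT_DEVICE_SEQNUM_MAP_IDE = {
--     '/dev/sda': 1, '/dev/vda': 1, '/dev/xvda': 1,
--     '/dev/sdb': 1001, '/dev/vdb': 1001, '/dev/xvdb': 1001,
--     '/dev/sdc': 1002, '/dev/vdc': 1002, '/dev/xvdc': 1002,
--     '/dev/sdd': 1003, '/dev/vdd': 1003, '/dev/xvdd': 1003,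
--     '/dev/sde': 2, '/dev/vde': 2, '/dev/xvde': 2,
--     '/dev/sdf': 3, '/dev/vdf': 3, '/dev/xvdf': 3,
--     '/dev/sdg': 4, '/dev/vdg': 4, '/dev/xvdg': 4,
--     '/dev/sdh': 5, '/dev/vdh': 5, '/dev/xvdh': 5,
--     '/dev/sdi': 6, '/dev/vdi': 6, '/dev/xvdi': 6,
--     '/dev/sdj': 7, '/dev/vdj': 7, '/dev/xvdj': 7,
--     '/dev/sdk': 8, '/dev/vdk': 8, '/dev/xvdk': 8,
--     '/dev/sdl': 9, '/dev/vdl': 9, '/dev/xvdl': 9,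
--     '/dev/sdm': 10, '/dev/vdm': 10, '/dev/xvdm': 10,
--     '/dev/sdn': 11, '/dev/vdn': 11, '/dev/xvdn': 11,
--     '/dev/sdo': 12, '/dev/vdo': 12, '/dev/xvdo': 12,
--     '/dev/sdp': 13, '/dev/vdp': 13, '/dev/xvdp': 13,
--     '/dev/sdq': 14, '/dev/vdq': 14, '/dev/xvdq': 14,
--     '/dev/sdr': 15, '/dev/vdr': 15, '/dev/xvdr': 15,
--     '/dev/sds': 16, '/dev/vds': 16, '/dev/xvds': 16,
--     '/dev/sdt': 17, '/dev/vdt': 17, '/dev/xvdt': 17,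
--     '/dev/sdu': 18, '/dev/vdu': 18, '/dev/xvdu': 18,
--     '/dev/sdv': 19, '/dev/vdv': 19, '/dev/xvdv': 19,
--     '/dev/sdw': 20, '/dev/vdw': 20, '/dev/xvdw': 20,
--     '/dev/sdx': 21, '/dev/vdx': 21, '/dev/xvdx': 21,
--     '/dev/sdy': 22, '/dev/vdy': 22, '/dev/xvdy': 22,
--     '/dev/sdz': 1004, '/dev/vdz': 1004, '/dev/xvdz': 1004,
--     '/dev/sdaa': 23, '/dev/vdaa': 23, '/dev/xvdaa': 23,
--     '/dev/sdab': 24, '/dev/vdab': 24, '/dev/xvdab': 24,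
--     '/dev/sdac': 25, '/dev/vdac': 25, '/dev/xvdac': 25,
--     '/dev/sdad': 26, '/dev/vdad': 26, '/dev/xvdad': 26,
--     '/dev/sdae': 27, '/dev/vdae': 27, '/dev/xvdae': 27,
--     '/dev/sdaf': 28, '/dev/vdaf': 28, '/dev/xvdaf': 28,
--     '/dev/sdag': 29, '/dev/vdag': 29, '/dev/xvdag': 29,
--     '/dev/sdah': 30, '/dev/vdah': 30, '/dev/xvdah': 30,
--     '/dev/sdai': 31, '/dev/vdai': 31, '/dev/xvdai': 31,
--     '/dev/sdaj': 32, '/dev/vdaj': 32, '/dev/xvdaj': 32,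
--     '/dev/sdak': 33, '/dev/vdak': 33, '/dev/xvdak': 33,
--     '/dev/sdal': 34, '/dev/vdal': 34, '/dev/xvdal': 34,
--     '/dev/sdam': 35, '/dev/vdam': 35, '/dev/xvdam': 35,
--     '/dev/sdan': 36, '/dev/vdan': 36, '/dev/xvdan': 36,
--     '/dev/sdao': 37, '/dev/vdao': 37, '/dev/xvdao': 37,
--     '/dev/sdap': 38, '/dev/vdap': 38, '/dev/xvdap': 38,
--     '/dev/sdaq': 39, '/dev/vdaq': 39, '/dev/xvdaq': 39,
--     '/dev/sdar': 40, '/dev/vdar': 40, '/dev/xvdar': 40,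
--     '/dev/sdas': 41, '/dev/vdas': 41, '/dev/xvdas': 41,
--     '/dev/sdat': 42, '/dev/vdat': 42, '/dev/xvdat': 42,
--     '/dev/sdau': 43, '/dev/vdau': 43, '/dev/xvdau': 43,
--     '/dev/sdav': 44, '/dev/vdav': 44, '/dev/xvdav': 44,
--     '/dev/sdaw': 45, '/dev/vdaw': 45, '/dev/xvdaw': 45,
--     '/dev/sdax': 46, '/dev/vdax': 46, '/dev/xvdax': 46,
--     '/dev/sday': 47, '/dev/vday': 47, '/dev/xvday': 47,
--     '/dev/sdaz': 48, '/dev/vdaz': 48, '/dev/xvdaz': 48,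
--     '/dev/sdba': 49, '/dev/vdba': 49, '/dev/xvdba': 49,
--     '/dev/sdbb': 50, '/dev/vdbb': 50, '/dev/xvdbb': 50,
--     '/dev/sdbc': 51, '/dev/vdbc': 51, '/dev/xvdbc': 51,
--     '/dev/sdbd': 52, '/dev/vdbd': 52, '/dev/xvdbd': 52,
--     '/dev/sdbe': 53, '/dev/vdbe': 53, '/dev/xvdbe': 53,
--     '/dev/sdbf': 54, '/dev/vdbf': 54, '/dev/xvdbf': 54,
--     '/dev/sdbg': 55, '/dev/vdbg': 55, '/dev/xvdbg': 55,
--     '/dev/sdbh': 56, '/dev/vdbh': 56, '/dev/xvdbh': 56,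
--     '/dev/sdbi': 57, '/dev/vdbi': 57, '/dev/xvdbi': 57,
--     '/dev/sdbj': 58, '/dev/vdbj': 58, '/dev/xvdbj': 58,
--     '/dev/sdbk': 59, '/dev/vdbk': 59, '/dev/xvdbk': 59,
--     '/dev/sdbl': 60, '/dev/vdbl': 60, '/dev/xvdbl': 60,
--     '/dev/sdbm': 61, '/dev/vdbm': 61, '/dev/xvdbm': 61
-- }
--
-- def search_dir(pardir):
--     res_lst = []
--     if pardir in MOUNT_DEVICE_SEQNUM_MAP_IDE.keys():
--         parkey = MOUNT_DEVICE_SEQNUM_MAP_IDE[pardir]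
--         for key, value in MOUNT_DEVICE_SEQNUM_MAP_IDE.items():
--             if value == parkey:
--                 res_lst.append(key)
--             else:
--                 continue
--         res_lst.remove(pardir)
--
--     return res_lst
-- ===== SOURCE B (Python) =====
-- _PREFIXES = ('sd', 'vd', 'xvd')
--
-- _SUFFIXES = ['a', 'b', 'c', 'd', 'e', 'f', 'g', 'h', 'i', 'j', 'k', 'l', 'm',
--              'n', 'o', 'p', 'q', 'r', 's', 't', 'u', 'v', 'w', 'x', 'y', 'z',
--              'aa', 'ab', 'ac', 'ad', 'ae', 'af', 'ag', 'ah', 'ai', 'aj', 'ak',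
--              'al', 'am', 'an', 'ao', 'ap', 'aq', 'ar', 'as', 'at', 'au', 'av',
--              'aw', 'ax', 'ay', 'az', 'ba', 'bb', 'bc', 'bd', 'be', 'bf', 'bg',
--              'bh', 'bi', 'bj', 'bk', 'bl', 'bm']
--
--
-- def search_dir(pardir):
--     # The IDE map's keys are exactly '/dev/' + prefix + suffix, and the keys
--     # sharing a seqnum value are precisely the three prefix variants of one
--     # suffix, in sd < vd < xvd insertion order.  So parse pardir instead of
--     # scanning the dict, and emit the other two prefix variants.
--     if not pardir.startswith('/dev/'):
--         return []
--     rest = pardir[5:]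
--     for pfx in _PREFIXES:
--         if rest.startswith(pfx):
--             sfx = rest[len(pfx):]
--             if sfx in _SUFFIXES:
--                 return ['/dev/' + q + sfx for q in _PREFIXES if q != pfx]
--             return []
--     return []
-- ===== Notes on version B (the rewrite author's own statement) =====
-- stated objective: alternative
-- what changed: B discards the dict and instead parses pardir against the map's regular key grammar '/dev/' + prefix(sd|vd|xvd) + suffix(a..z,aa..az,ba..bm), emitting the other two prefix variants of the same suffix, which is exactly A's same-value key group minus pardir; A scans all 195 items per call.
import Mathlib
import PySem

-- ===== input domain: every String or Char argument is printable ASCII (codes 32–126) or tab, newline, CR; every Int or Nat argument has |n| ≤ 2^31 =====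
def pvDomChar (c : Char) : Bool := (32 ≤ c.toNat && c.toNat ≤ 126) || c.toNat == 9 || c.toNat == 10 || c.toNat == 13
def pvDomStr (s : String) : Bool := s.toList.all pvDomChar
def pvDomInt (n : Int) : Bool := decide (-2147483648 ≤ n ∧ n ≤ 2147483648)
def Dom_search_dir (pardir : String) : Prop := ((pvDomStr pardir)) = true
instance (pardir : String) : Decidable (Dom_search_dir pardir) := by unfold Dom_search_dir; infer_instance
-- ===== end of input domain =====

-- B drops the dict entirely: it parses pardir as '/dev/' + prefix + suffix against the map's regular key grammar and emits the other two prefix variants; return-value equivalence is proved.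
-- ===== PORT A =====
def MOUNT_MAP : PySem.Dict String Int := PySem.Dict.mk [
  ("/dev/sda", 1),
  ("/dev/vda", 1),
  ("/dev/xvda", 1),
  ("/dev/sdb", 1001),
  ("/dev/vdb", 1001),
  ("/dev/xvdb", 1001),
  ("/dev/sdc", 1002),
  ("/dev/vdc", 1002),
  ("/dev/xvdc", 1002),
  ("/dev/sdd", 1003),
  ("/dev/vdd", 1003),
  ("/dev/xvdd", 1003),
  ("/dev/sde", 2),
  ("/dev/vde", 2),
  ("/dev/xvde", 2),
  ("/dev/sdf", 3),
  ("/dev/vdf", 3),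
  ("/dev/xvdf", 3),
  ("/dev/sdg", 4),
  ("/dev/vdg", 4),
  ("/dev/xvdg", 4),
  ("/dev/sdh", 5),
  ("/dev/vdh", 5),
  ("/dev/xvdh", 5),
  ("/dev/sdi", 6),
  ("/dev/vdi", 6),
  ("/dev/xvdi", 6),
  ("/dev/sdj", 7),
  ("/dev/vdj", 7),
  ("/dev/xvdj", 7),
  ("/dev/sdk", 8),
  ("/dev/vdk", 8),
  ("/dev/xvdk", 8),
  ("/dev/sdl", 9),
  ("/dev/vdl", 9),
  ("/dev/xvdl", 9),
  ("/dev/sdm", 10),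
  ("/dev/vdm", 10),
  ("/dev/xvdm", 10),
  ("/dev/sdn", 11),
  ("/dev/vdn", 11),
  ("/dev/xvdn", 11),
  ("/dev/sdo", 12),
  ("/dev/vdo", 12),
  ("/dev/xvdo", 12),
  ("/dev/sdp", 13),
  ("/dev/vdp", 13),
  ("/dev/xvdp", 13),
  ("/dev/sdq", 14),
  ("/dev/vdq", 14),
  ("/dev/xvdq", 14),
  ("/dev/sdr", 15),
  ("/dev/vdr", 15),
  ("/dev/xvdr", 15),
  ("/dev/sds", 16),
  ("/dev/vds", 16),
  ("/dev/xvds", 16),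
  ("/dev/sdt", 17),
  ("/dev/vdt", 17),
  ("/dev/xvdt", 17),
  ("/dev/sdu", 18),
  ("/dev/vdu", 18),
  ("/dev/xvdu", 18),
  ("/dev/sdv", 19),
  ("/dev/vdv", 19),
  ("/dev/xvdv", 19),
  ("/dev/sdw", 20),
  ("/dev/vdw", 20),
  ("/dev/xvdw", 20),
  ("/dev/sdx", 21),
  ("/dev/vdx", 21),
  ("/dev/xvdx", 21),
  ("/dev/sdy", 22),
  ("/dev/vdy", 22),
  ("/dev/xvdy", 22),
  ("/dev/sdz", 1004),
  ("/dev/vdz", 1004),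
  ("/dev/xvdz", 1004),
  ("/dev/sdaa", 23),
  ("/dev/vdaa", 23),
  ("/dev/xvdaa", 23),
  ("/dev/sdab", 24),
  ("/dev/vdab", 24),
  ("/dev/xvdab", 24),
  ("/dev/sdac", 25),
  ("/dev/vdac", 25),
  ("/dev/xvdac", 25),
  ("/dev/sdad", 26),
  ("/dev/vdad", 26),
  ("/dev/xvdad", 26),
  ("/dev/sdae", 27),
  ("/dev/vdae", 27),
  ("/dev/xvdae", 27),
  ("/dev/sdaf", 28),
  ("/dev/vdaf", 28),
  ("/dev/xvdaf", 28),
  ("/dev/sdag", 29),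
  ("/dev/vdag", 29),
  ("/dev/xvdag", 29),
  ("/dev/sdah", 30),
  ("/dev/vdah", 30),
  ("/dev/xvdah", 30),
  ("/dev/sdai", 31),
  ("/dev/vdai", 31),
  ("/dev/xvdai", 31),
  ("/dev/sdaj", 32),
  ("/dev/vdaj", 32),
  ("/dev/xvdaj", 32),
  ("/dev/sdak", 33),
  ("/dev/vdak", 33),
  ("/dev/xvdak", 33),
  ("/dev/sdal", 34),
  ("/dev/vdal", 34),
  ("/dev/xvdal", 34),
  ("/dev/sdam", 35),
  ("/dev/vdam", 35),
  ("/dev/xvdam", 35),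
  ("/dev/sdan", 36),
  ("/dev/vdan", 36),
  ("/dev/xvdan", 36),
  ("/dev/sdao", 37),
  ("/dev/vdao", 37),
  ("/dev/xvdao", 37),
  ("/dev/sdap", 38),
  ("/dev/vdap", 38),
  ("/dev/xvdap", 38),
  ("/dev/sdaq", 39),
  ("/dev/vdaq", 39),
  ("/dev/xvdaq", 39),
  ("/dev/sdar", 40),
  ("/dev/vdar", 40),
  ("/dev/xvdar", 40),
  ("/dev/sdas", 41),
  ("/dev/vdas", 41),
  ("/dev/xvdas", 41),
  ("/dev/sdat", 42),
  ("/dev/vdat", 42),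
  ("/dev/xvdat", 42),
  ("/dev/sdau", 43),
  ("/dev/vdau", 43),
  ("/dev/xvdau", 43),
  ("/dev/sdav", 44),
  ("/dev/vdav", 44),
  ("/dev/xvdav", 44),
  ("/dev/sdaw", 45),
  ("/dev/vdaw", 45),
  ("/dev/xvdaw", 45),
  ("/dev/sdax", 46),
  ("/dev/vdax", 46),
  ("/dev/xvdax", 46),
  ("/dev/sday", 47),
  ("/dev/vday", 47),
  ("/dev/xvday", 47),
  ("/dev/sdaz", 48),
  ("/dev/vdaz", 48),
  ("/dev/xvdaz", 48),
  ("/dev/sdba", 49),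
  ("/dev/vdba", 49),
  ("/dev/xvdba", 49),
  ("/dev/sdbb", 50),
  ("/dev/vdbb", 50),
  ("/dev/xvdbb", 50),
  ("/dev/sdbc", 51),
  ("/dev/vdbc", 51),
  ("/dev/xvdbc", 51),
  ("/dev/sdbd", 52),
  ("/dev/vdbd", 52),
  ("/dev/xvdbd", 52),
  ("/dev/sdbe", 53),
  ("/dev/vdbe", 53),
  ("/dev/xvdbe", 53),
  ("/dev/sdbf", 54),
  ("/dev/vdbf", 54),
  ("/dev/xvdbf", 54),
  ("/dev/sdbg", 55),
  ("/dev/vdbg", 55),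
  ("/dev/xvdbg", 55),
  ("/dev/sdbh", 56),
  ("/dev/vdbh", 56),
  ("/dev/xvdbh", 56),
  ("/dev/sdbi", 57),
  ("/dev/vdbi", 57),
  ("/dev/xvdbi", 57),
  ("/dev/sdbj", 58),
  ("/dev/vdbj", 58),
  ("/dev/xvdbj", 58),
  ("/dev/sdbk", 59),
  ("/dev/vdbk", 59),
  ("/dev/xvdbk", 59),
  ("/dev/sdbl", 60),
  ("/dev/vdbl", 60),
  ("/dev/xvdbl", 60),
  ("/dev/sdbm", 61),
  ("/dev/vdbm", 61),
  ("/dev/xvdbm", 61)]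

def search_dir (pardir : String) : List String :=
  let res_lst : List String := []
  if MOUNT_MAP.contains pardir then
    let parkey := MOUNT_MAP.getD pardir 0   -- dict[pardir]; guarded by the membership test, so never the default
    let res_lst := MOUNT_MAP.items.foldl
      (fun acc p => if p.2 == parkey then acc ++ [p.1] else acc) res_lst
    (PySem.List.remove? res_lst pardir).getD res_lst   -- res_lst.remove(pardir); pardir is always present here
  else
    res_lst

-- ===== PORT B =====
-- _PREFIXES and _SUFFIXES from Source B, as code-point lists
def PREFIXES : List (List Char) := [['s','d'], ['v','d'], ['x','v','d']]
def SUFFIXES : List (List Char) := [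
  ['a'],
  ['b'],
  ['c'],
  ['d'],
  ['e'],
  ['f'],
  ['g'],
  ['h'],
  ['i'],
  ['j'],
  ['k'],
  ['l'],
  ['m'],
  ['n'],
  ['o'],
  ['p'],
  ['q'],
  ['r'],
  ['s'],
  ['t'],
  ['u'],
  ['v'],
  ['w'],
  ['x'],
  ['y'],
  ['z'],
  ['a', 'a'],
  ['a', 'b'],
  ['a', 'c'],
  ['a', 'd'],
  ['a', 'e'],
  ['a', 'f'],
  ['a', 'g'],
  ['a', 'h'],
  ['a', 'i'],
  ['a', 'j'],
  ['a', 'k'],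
  ['a', 'l'],
  ['a', 'm'],
  ['a', 'n'],
  ['a', 'o'],
  ['a', 'p'],
  ['a', 'q'],
  ['a', 'r'],
  ['a', 's'],
  ['a', 't'],
  ['a', 'u'],
  ['a', 'v'],
  ['a', 'w'],
  ['a', 'x'],
  ['a', 'y'],
  ['a', 'z'],
  ['b', 'a'],
  ['b', 'b'],
  ['b', 'c'],
  ['b', 'd'],
  ['b', 'e'],
  ['b', 'f'],
  ['b', 'g'],
  ['b', 'h'],
  ['b', 'i'],
  ['b', 'j'],
  ['b', 'k'],
  ['b', 'l'],
  ['b', 'm']]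
def DEVP : List Char := ['/','d','e','v','/']   -- '/dev/'

def search_dir_alt (pardir : String) : List String :=
  let cs := pardir.toList
  if PySem.Chars.startswith cs DEVP then          -- pardir.startswith('/dev/')
    let rest := PySem.List.slice cs (some 5) none -- pardir[5:]
    match PREFIXES.find? (fun p => PySem.Chars.startswith rest p) with  -- first matching prefix
    | some pfx =>
        let sfx := PySem.List.slice rest (some (pfx.length : Int)) none -- rest[len(pfx):]
        if SUFFIXES.contains sfx then             -- sfx in _SUFFIXES
          (PREFIXES.filter (fun q => q ≠ pfx)).map
            (fun q => String.ofList (DEVP ++ q ++ sfx))                 -- '/dev/' + q + sfx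
        else []
    | none => []
  else []

-- ===== PRECONDITION & SPEC =====
def Spec_search_dir (pardir : String) (out : List String) : Prop := out = search_dir_alt pardir
instance (pardir : String) (out : List String) : Decidable (Spec_search_dir pardir out) := by unfold Spec_search_dir; infer_instance

-- ===== CLAIM =====
def Claim_equal_search_dir : Prop := ∀ (pardir : String), Dom_search_dir pardir → Spec_search_dir pardir (search_dir pardir)

-- ===== LEMMAS AND PROOFS =====
-- On every key of the map the two ports agree (finite check).
set_option maxRecDepth 100000 in
set_option maxHeartbeats 4000000 in
theorem agree_on_keys :
    (MOUNT_MAP.keys.all (fun k => search_dir k == search_dir_alt k)) = true := by decide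

-- Every '/dev/' + prefix + suffix combination is a key of the map (finite check).
set_option maxRecDepth 100000 in
set_option maxHeartbeats 4000000 in
theorem combo_is_key :
    (PREFIXES.all (fun p => SUFFIXES.all
      (fun s => MOUNT_MAP.contains (String.ofList (DEVP ++ p ++ s))))) = true := by decide

theorem alt_nil_of_not_key (pardir : String)
    (h : MOUNT_MAP.contains pardir = false) : search_dir_alt pardir = [] := by
  unfold search_dir_alt
  cases hsw : PySem.Chars.startswith pardir.toList DEVP with
  | false => simp [hsw]
  | true =>
    cases hf : PREFIXES.find? (fun p =>
        PySem.Chars.startswith (PySem.List.slice pardir.toList (some 5) none) p) with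
    | none => simp [hsw, hf]
    | some pfx =>
      by_cases hs : PySem.List.slice (PySem.List.slice pardir.toList (some 5) none)
          (some (pfx.length : Int)) none ∈ SUFFIXES
      case neg =>
        rw [PySem.List.slice_from_natCast] at hs
        simp [hsw, hf]
        exact fun hmem => absurd hmem hs
      case pos =>
        exfalso
        -- reconstruct pardir = '/dev/' ++ pfx ++ sfx and contradict h via combo_is_key
        have hrest : PySem.List.slice pardir.toList (some 5) none = pardir.toList.drop 5 := by
          rw [PySem.List.slice_from pardir.toList (by norm_num : (0:Int) ≤ 5)]
          rfl
        have hlen : DEVP.length = 5 := rfl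
        have hdev : pardir.toList = DEVP ++ pardir.toList.drop 5 := by
          rw [← hlen]
          exact List.prefix_append_drop ((PySem.Chars.startswith_iff _ _).mp hsw)
        have hpfxmem : pfx ∈ PREFIXES := List.mem_of_find?_eq_some hf
        have hpsw : PySem.Chars.startswith (pardir.toList.drop 5) pfx = true := by
          have := List.find?_some hf
          rwa [hrest] at this
        have hrest2 : pardir.toList.drop 5 = pfx ++ (pardir.toList.drop 5).drop pfx.length :=
          List.prefix_append_drop ((PySem.Chars.startswith_iff _ _).mp hpsw)
        have hsmem : (pardir.toList.drop 5).drop pfx.length ∈ SUFFIXES := by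
          rwa [hrest, PySem.List.slice_from_natCast] at hs
        have hpar : pardir = String.ofList (DEVP ++ pfx ++ ((pardir.toList.drop 5).drop pfx.length)) := by
          conv_lhs => rw [← String.ofList_toList (s := pardir)]
          rw [List.append_assoc, ← hrest2, ← hdev]
        have hcontains : MOUNT_MAP.contains pardir = true := by
          rw [hpar]
          have h1 := (List.all_eq_true.mp combo_is_key) pfx hpfxmem
          exact (List.all_eq_true.mp h1) _ hsmem
        rw [hcontains] at h
        exact Bool.noConfusion h

theorem search_dir_eq_alt (pardir : String) : search_dir pardir = search_dir_alt pardir := by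
  cases h : MOUNT_MAP.contains pardir with
  | true =>
    have hk : pardir ∈ MOUNT_MAP.keys := (PySem.Dict.contains_iff_mem_keys _ _).mp h
    exact eq_of_beq ((List.all_eq_true.mp agree_on_keys) pardir hk)
  | false =>
    have hA : search_dir pardir = [] := by unfold search_dir; simp [h]
    rw [hA, alt_nil_of_not_key pardir h]

-- ===== VERDICT =====
theorem search_dir_spec : Claim_equal_search_dir := by
  intro pardir _
  unfold Spec_search_dir
  exact search_dir_eq_alt pardir
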